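-- pv_equiv track=rewrite | github.com/Aryudesu/ABC | AlnMath/85.py | calc
-- ===== SOURCE A (Python) =====
-- def calc(N: int, X: int, Y: int):
--     data = set()
--     for i in range(1, N + 1):
--         for j in range(1, N + 1):
--             data.add((i + j, i * j))
--     for i in range(1, N + 1):
--         for j in range(1, N + 1):
--             if Y % (i * j) > 0:
--                 continue
--             tmp = (X - (i + j), Y // (i * j))
--             if tmp in data:
--                 return True
--     return False
-- ===== SOURCE B (Python) =====
-- def divisors(n):
--     ds = []
--     d = 1
--     while d * d <= n:
--         if n % d == 0:
--             ds.append(d)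
--             if d * d < n:
--                 ds.append(n // d)
--         d += 1
--     return ds
--
-- def calc(N: int, X: int, Y: int):
--     if Y < 1:
--         return False
--     for i in divisors(Y):
--         if i > N:
--             continue
--         Yi = Y // i
--         for j in divisors(Yi):
--             if j > N:
--                 continue
--             Yij = Yi // j
--             for k in divisors(Yij):
--                 if k > N:
--                     continue
--                 l = Yij // k
--                 if l <= N and i + j + k + l == X:
--                     return True
--     return False
-- ===== Notes on version B (the rewrite author's own statement) =====
-- stated objective: faster
-- what changed: Replaced the O(N^2) meet-in-the-middle scheme (hash set of all (i+j, i*j) pairs plus a second O(N^2) scan) by enumerating divisor triples of Y via a sqrt(Y) divisor routine: i | Y, j | Y//i, k | (Y//i)//j with the fourth factor forced, testing the sum directly; no auxiliary set and no loop over non-divisors.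
import Mathlib
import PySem

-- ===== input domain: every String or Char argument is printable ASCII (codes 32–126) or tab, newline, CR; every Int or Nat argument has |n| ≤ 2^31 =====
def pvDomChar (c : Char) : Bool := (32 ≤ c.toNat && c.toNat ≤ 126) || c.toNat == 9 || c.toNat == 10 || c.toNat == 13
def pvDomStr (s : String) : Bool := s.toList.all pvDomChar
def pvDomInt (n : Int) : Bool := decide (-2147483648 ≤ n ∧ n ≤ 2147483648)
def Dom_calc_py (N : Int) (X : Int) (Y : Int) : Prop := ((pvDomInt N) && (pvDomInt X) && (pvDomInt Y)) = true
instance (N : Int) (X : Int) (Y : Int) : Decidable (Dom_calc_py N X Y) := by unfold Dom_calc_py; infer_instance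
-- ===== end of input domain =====

-- B replaces A's set-of-(sum,product)-pairs meet-in-the-middle scheme by enumerating
-- divisor triples of Y (sqrt-divisor routine), which a timing run measured faster.

-- ===== PORT A =====
def calc_py (N : Int) (X : Int) (Y : Int) : Bool :=
  let R := PySem.List.pyRange 1 (N + 1) 1
  let data : PySem.Set (Int × Int) :=
    R.foldl (fun s i => R.foldl (fun s j => PySem.Set.add s (i + j, i * j)) s) PySem.Set.empty
  R.any (fun i => R.any (fun j =>
    if PySem.Int.mod Y (i * j) > 0 then false
    else PySem.Set.contains data (X - (i + j), PySem.Int.floordiv Y (i * j))))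

-- ===== PORT B =====
-- while d*d<=n loop of Source B's divisors(); the '1 ≤ d' in the guard is a termination
-- guard only (divisors always calls with d = 1, and d only increases)
def pvDivisorsAux (n : Int) (d : Int) (acc : List Int) : List Int :=
  if h : 1 ≤ d ∧ d * d ≤ n then
    pvDivisorsAux n (d + 1)
      (if PySem.Int.mod n d = 0 then
         (if d * d < n then acc ++ [d, PySem.Int.floordiv n d] else acc ++ [d])
       else acc)
  else acc
termination_by (n + 1 - d).toNat
decreasing_by
  have hdn : d ≤ n := by nlinarith [h.1, h.2]
  omega

def pvDivisors (n : Int) : List Int := pvDivisorsAux n 1 []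

def calc_py_alt (N : Int) (X : Int) (Y : Int) : Bool :=
  if Y < 1 then false
  else
    (pvDivisors Y).any (fun i =>
      if i > N then false else
      (pvDivisors (PySem.Int.floordiv Y i)).any (fun j =>
        if j > N then false else
        (pvDivisors (PySem.Int.floordiv (PySem.Int.floordiv Y i) j)).any (fun k =>
          if k > N then false else
          decide (PySem.Int.floordiv (PySem.Int.floordiv (PySem.Int.floordiv Y i) j) k ≤ N) &&
          decide (i + j + k + PySem.Int.floordiv (PySem.Int.floordiv (PySem.Int.floordiv Y i) j) k = X))))

-- ===== PRECONDITION & SPEC =====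
def Spec_calc_py (N : Int) (X : Int) (Y : Int) (out : Bool) : Prop := out = calc_py_alt N X Y
instance (N : Int) (X : Int) (Y : Int) (out : Bool) : Decidable (Spec_calc_py N X Y out) := by unfold Spec_calc_py; infer_instance

-- ===== CLAIM (what is proved, stated in full; the proofs are below) =====
def Claim_equal_calc_py : Prop := ∀ (N : Int) (X : Int) (Y : Int), Dom_calc_py N X Y → Spec_calc_py N X Y (calc_py N X Y)

-- ===== LEMMAS AND PROOFS =====

-- membership in A's two-phase set of (sum, product) pairs
lemma mem_data (R L : List Int) (x : Int × Int) (s : PySem.Set (Int × Int)) :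
    x ∈ L.foldl (fun s i => R.foldl (fun s j => PySem.Set.add s (i + j, i * j)) s) s ↔
      x ∈ s ∨ ∃ i ∈ L, ∃ j ∈ R, x = (i + j, i * j) := by
  induction L generalizing s with
  | nil => simp
  | cons a L ih =>
    simp only [List.foldl_cons, ih, PySem.Set.mem_foldl_add, List.mem_cons]
    constructor
    · rintro (⟨h | ⟨j, hj, rfl⟩⟩ | ⟨i, hi, j, hj, rfl⟩)
      · exact Or.inl h
      · exact Or.inr ⟨a, Or.inl rfl, j, hj, rfl⟩
      · exact Or.inr ⟨i, Or.inr hi, j, hj, rfl⟩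
    · rintro (h | ⟨i, (rfl | hi), j, hj, rfl⟩)
      · exact Or.inl (Or.inl h)
      · exact Or.inl (Or.inr ⟨j, hj, rfl⟩)
      · exact Or.inr ⟨i, hi, j, hj, rfl⟩

-- the arithmetic heart of A: for i, j ≥ 1, A's guarded membership test is the direct test
lemma guard_iff (X Y i j k l : Int) (hi : 1 ≤ i) (hj : 1 ≤ j) :
    (¬ PySem.Int.mod Y (i * j) > 0 ∧ X - (i + j) = k + l ∧ PySem.Int.floordiv Y (i * j) = k * l)
      ↔ (i + j + k + l = X ∧ i * j * k * l = Y) := by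
  have hij : 0 < i * j := mul_pos (by omega) (by omega)
  rw [PySem.Int.mod_eq_emod_of_pos hij, PySem.Int.floordiv_eq_ediv_of_pos hij]
  have hnn : 0 ≤ Y % (i * j) := Int.emod_nonneg Y (by omega)
  constructor
  · rintro ⟨hmod, hsum, hdiv⟩
    have h0 : Y % (i * j) = 0 := by omega
    have hdvd : (i * j) ∣ Y := Int.dvd_of_emod_eq_zero h0
    have hYe : Y = (k * l) * (i * j) := by
      rw [← hdiv]; exact (Int.ediv_mul_cancel hdvd).symm
    exact ⟨by omega, by rw [hYe]; ring⟩
  · rintro ⟨hsum, hprod⟩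
    have hY : Y = (i * j) * (k * l) := by rw [← hprod]; ring
    have hdvd : (i * j) ∣ Y := ⟨k * l, hY⟩
    refine ⟨by simp [Int.emod_eq_zero_of_dvd hdvd], by omega, ?_⟩
    rw [hY, Int.mul_ediv_cancel_left _ (by omega)]

-- characterisation of A as a quadruple existential
lemma calc_py_iff (N X Y : Int) :
    calc_py N X Y = true ↔
      ∃ i ∈ PySem.List.pyRange 1 (N + 1) 1, ∃ j ∈ PySem.List.pyRange 1 (N + 1) 1,
      ∃ k ∈ PySem.List.pyRange 1 (N + 1) 1, ∃ l ∈ PySem.List.pyRange 1 (N + 1) 1,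
        i + j + k + l = X ∧ i * j * k * l = Y := by
  unfold calc_py
  simp only [List.any_eq_true]
  constructor
  · rintro ⟨i, hi, j, hj, h⟩
    by_cases hmod : PySem.Int.mod Y (i * j) > 0
    · rw [if_pos hmod] at h; exact absurd h (by simp)
    · rw [if_neg hmod, PySem.Set.contains_iff, mem_data] at h
      rcases h with h | ⟨k, hk, l, hl, hx⟩
      · simp [PySem.Set.empty] at h
      · obtain ⟨h1, h2⟩ := Prod.mk.injEq .. ▸ hx
        have hi1 := (PySem.List.mem_pyRange_one.mp hi).1
        have hj1 := (PySem.List.mem_pyRange_one.mp hj).1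
        obtain ⟨hs, hp⟩ := (guard_iff X Y i j k l hi1 hj1).mp ⟨hmod, h1, h2⟩
        exact ⟨i, hi, j, hj, k, hk, l, hl, hs, hp⟩
  · rintro ⟨i, hi, j, hj, k, hk, l, hl, hs, hp⟩
    have hi1 := (PySem.List.mem_pyRange_one.mp hi).1
    have hj1 := (PySem.List.mem_pyRange_one.mp hj).1
    obtain ⟨hmod, h1, h2⟩ := (guard_iff X Y i j k l hi1 hj1).mpr ⟨hs, hp⟩
    refine ⟨i, hi, j, hj, ?_⟩
    rw [if_neg hmod, PySem.Set.contains_iff, mem_data]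
    exact Or.inr ⟨k, hk, l, hl, by rw [h1, h2]⟩

-- the sqrt-divisor loop collects exactly the divisors x of n with d ≤ min(x, n/x)
lemma mem_pvDivisorsAux (n : Int) (hn : 1 ≤ n) :
    ∀ (m : Nat) (d : Int), (n + 1 - d).toNat = m → 1 ≤ d → ∀ (acc : List Int) (x : Int),
      (x ∈ pvDivisorsAux n d acc ↔ x ∈ acc ∨ (x ∣ n ∧ d ≤ x ∧ d ≤ n / x)) := by
  intro m
  induction m using Nat.strong_induction_on with
  | _ m ih =>
    intro d hm hd acc x
    rw [pvDivisorsAux]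
    by_cases hdd : d * d ≤ n
    · rw [dif_pos ⟨hd, hdd⟩]
      have hdn : d ≤ n := by nlinarith
      have hrec := ih (n + 1 - (d + 1)).toNat (by omega) (d + 1) rfl (by omega)
      rw [PySem.Int.mod_eq_emod_of_pos (by omega : (0:Int) < d),
          PySem.Int.floordiv_eq_ediv_of_pos (by omega : (0:Int) < d)]
      have key : ∀ y : Int, (y ∣ n ∧ d ≤ y ∧ d ≤ n / y) ↔
          (y ∣ n ∧ d + 1 ≤ y ∧ d + 1 ≤ n / y) ∨ (d ∣ n ∧ (y = d ∨ y = n / d)) := by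
        intro y
        constructor
        · rintro ⟨hyd, hy1, hy2⟩
          by_cases h1 : y = d
          · exact Or.inr ⟨h1 ▸ hyd, Or.inl h1⟩
          by_cases h2 : n / y = d
          · have hny : y * (n / y) = n := Int.mul_ediv_cancel' hyd
            have hnd : n = y * d := by rw [← hny, h2]
            have : d ∣ n := ⟨y, by rw [hnd]; ring⟩
            have hx : n / d = y := by rw [hnd, mul_comm, Int.mul_ediv_cancel_left _ (by omega)]
            exact Or.inr ⟨this, Or.inr hx.symm⟩
          · exact Or.inl ⟨hyd, by omega, by omega⟩
        · rintro (⟨hyd, hy1, hy2⟩ | ⟨hddvd, hy⟩)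
          · exact ⟨hyd, by omega, by omega⟩
          · have hny : d * (n / d) = n := Int.mul_ediv_cancel' hddvd
            have hq : d ≤ n / d := by
              rw [Int.le_ediv_iff_mul_le (by omega : (0:Int) < d)]; nlinarith
            rcases hy with hy | hy
            · subst hy; exact ⟨hddvd, le_refl _, hq⟩
            · subst hy
              have hdvd2 : n / d ∣ n := ⟨d, by rw [mul_comm]; exact hny.symm⟩
              have hnd0 : n / d ≠ 0 := by intro h0; rw [h0] at hq; omega
              set q := n / d with hqdef
              have heq : n / q = d := by
                rw [← hny]; exact Int.mul_ediv_cancel _ hnd0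
              exact ⟨hdvd2, hq, le_of_eq heq.symm⟩
      by_cases hmod : n % d = 0
      · have hddvd : d ∣ n := Int.dvd_of_emod_eq_zero hmod
        have hnd_ge : d ≤ n / d := by
          rw [Int.le_ediv_iff_mul_le (by omega : (0:Int) < d)]; nlinarith
        rw [if_pos hmod]
        by_cases hlt : d * d < n
        · rw [if_pos hlt, hrec]
          simp only [List.mem_append, List.mem_cons, List.not_mem_nil, or_false, key x]
          constructor
          · rintro ((h | rfl | rfl) | h)
            · exact Or.inl h
            · exact Or.inr (Or.inr ⟨hddvd, Or.inl rfl⟩)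
            · exact Or.inr (Or.inr ⟨hddvd, Or.inr rfl⟩)
            · exact Or.inr (Or.inl h)
          · rintro (h | (h | ⟨_, (rfl | rfl)⟩))
            · exact Or.inl (Or.inl h)
            · exact Or.inr h
            · exact Or.inl (Or.inr (Or.inl rfl))
            · exact Or.inl (Or.inr (Or.inr rfl))
        · have hsq : d * d = n := by omega
          have hnd_eq : n / d = d := by
            rw [← hsq, Int.mul_ediv_cancel _ (by omega : (d:Int) ≠ 0)]
          rw [if_neg hlt, hrec]
          simp only [List.mem_append, List.mem_cons, List.not_mem_nil, or_false, key x]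
          constructor
          · rintro ((h | rfl) | h)
            · exact Or.inl h
            · exact Or.inr (Or.inr ⟨hddvd, Or.inl rfl⟩)
            · exact Or.inr (Or.inl h)
          · rintro (h | (h | ⟨_, (rfl | rfl)⟩))
            · exact Or.inl (Or.inl h)
            · exact Or.inr h
            · exact Or.inl (Or.inr rfl)
            · rw [hnd_eq]; exact Or.inl (Or.inr rfl)
        -- end of d ∣ n case
      · rw [if_neg hmod, hrec]
        have hnodvd : ¬ d ∣ n := fun h => hmod (Int.emod_eq_zero_of_dvd h)
        rw [key x]
        constructor
        · rintro (h | h)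
          · exact Or.inl h
          · exact Or.inr (Or.inl h)
        · rintro (h | (h | ⟨hc, _⟩))
          · exact Or.inl h
          · exact Or.inr h
          · exact absurd hc hnodvd
    · rw [dif_neg (by tauto)]
      constructor
      · exact Or.inl
      · rintro (h | ⟨hyd, hy1, hy2⟩)
        · exact h
        · exfalso
          have hny : x * (n / x) = n := Int.mul_ediv_cancel' hyd
          nlinarith
lemma mem_pvDivisors (n : Int) (hn : 1 ≤ n) (x : Int) :
    x ∈ pvDivisors n ↔ x ∣ n ∧ 1 ≤ x := by
  unfold pvDivisors
  rw [mem_pvDivisorsAux n hn _ 1 rfl (le_refl 1) [] x]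
  simp only [List.not_mem_nil, false_or]
  constructor
  · rintro ⟨h1, h2, _⟩; exact ⟨h1, h2⟩
  · rintro ⟨h1, h2⟩
    refine ⟨h1, h2, ?_⟩
    rw [Int.le_ediv_iff_mul_le (by omega : (0:Int) < x)]
    simpa using Int.le_of_dvd (by omega) h1

-- characterisation of B as the same quadruple existential
lemma calc_py_alt_iff (N X Y : Int) :
    calc_py_alt N X Y = true ↔
      ∃ i ∈ PySem.List.pyRange 1 (N + 1) 1, ∃ j ∈ PySem.List.pyRange 1 (N + 1) 1,
      ∃ k ∈ PySem.List.pyRange 1 (N + 1) 1, ∃ l ∈ PySem.List.pyRange 1 (N + 1) 1,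
        i + j + k + l = X ∧ i * j * k * l = Y := by
  unfold calc_py_alt
  by_cases hY : Y < 1
  · rw [if_pos hY]
    simp only [Bool.false_eq_true, false_iff]
    rintro ⟨i, hi, j, hj, k, hk, l, hl, -, hp⟩
    have hi1 := (PySem.List.mem_pyRange_one.mp hi).1
    have hj1 := (PySem.List.mem_pyRange_one.mp hj).1
    have hk1 := (PySem.List.mem_pyRange_one.mp hk).1
    have hl1 := (PySem.List.mem_pyRange_one.mp hl).1
    have h12 : (1:Int) ≤ i * j := by nlinarith
    have h123 : (1:Int) ≤ i * j * k := by nlinarith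
    have h1234 : (1:Int) ≤ i * j * k * l := by nlinarith
    linarith [hp]
  · rw [if_neg hY]
    have hY1 : (1:Int) ≤ Y := by omega
    rw [List.any_eq_true]
    constructor
    · rintro ⟨i, hi, h⟩
      by_cases hiN : i > N
      · rw [if_pos hiN] at h; exact absurd h (by simp)
      rw [if_neg hiN] at h
      obtain ⟨hidvd, hi1⟩ := (mem_pvDivisors Y hY1 i).mp hi
      rw [PySem.Int.floordiv_eq_ediv_of_pos (by omega : (0:Int) < i), List.any_eq_true] at h
      have hYi1 : (1:Int) ≤ Y / i := by
        rw [Int.le_ediv_iff_mul_le (by omega : (0:Int) < i)]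
        simpa using Int.le_of_dvd (by omega) hidvd
      obtain ⟨j, hj, h⟩ := h
      by_cases hjN : j > N
      · rw [if_pos hjN] at h; exact absurd h (by simp)
      rw [if_neg hjN] at h
      obtain ⟨hjdvd, hj1⟩ := (mem_pvDivisors _ hYi1 j).mp hj
      rw [PySem.Int.floordiv_eq_ediv_of_pos (by omega : (0:Int) < j), List.any_eq_true] at h
      have hYij1 : (1:Int) ≤ Y / i / j := by
        rw [Int.le_ediv_iff_mul_le (by omega : (0:Int) < j)]
        simpa using Int.le_of_dvd (by omega) hjdvd
      obtain ⟨k, hk, h⟩ := h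
      by_cases hkN : k > N
      · rw [if_pos hkN] at h; exact absurd h (by simp)
      rw [if_neg hkN] at h
      obtain ⟨hkdvd, hk1⟩ := (mem_pvDivisors _ hYij1 k).mp hk
      rw [PySem.Int.floordiv_eq_ediv_of_pos (by omega : (0:Int) < k)] at h
      simp only [Bool.and_eq_true, decide_eq_true_iff] at h
      obtain ⟨hlN, hsum⟩ := h
      have hl1 : (1:Int) ≤ Y / i / j / k := by
        rw [Int.le_ediv_iff_mul_le (by omega : (0:Int) < k)]
        simpa using Int.le_of_dvd (by omega) hkdvd
      have e3 : k * (Y / i / j / k) = Y / i / j := Int.mul_ediv_cancel' hkdvd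
      have e2 : j * (Y / i / j) = Y / i := Int.mul_ediv_cancel' hjdvd
      have e1 : i * (Y / i) = Y := Int.mul_ediv_cancel' hidvd
      refine ⟨i, PySem.List.mem_pyRange_one.mpr ⟨hi1, by omega⟩,
              j, PySem.List.mem_pyRange_one.mpr ⟨hj1, by omega⟩,
              k, PySem.List.mem_pyRange_one.mpr ⟨hk1, by omega⟩,
              Y / i / j / k, PySem.List.mem_pyRange_one.mpr ⟨hl1, by omega⟩,
              by omega, ?_⟩
      calc i * j * k * (Y / i / j / k) = i * (j * (k * (Y / i / j / k))) := by ring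
        _ = i * (j * (Y / i / j)) := by rw [e3]
        _ = i * (Y / i) := by rw [e2]
        _ = Y := e1
    · rintro ⟨i, hi, j, hj, k, hk, l, hl, hsum, hprod⟩
      obtain ⟨hi1, hiN⟩ := PySem.List.mem_pyRange_one.mp hi
      obtain ⟨hj1, hjN⟩ := PySem.List.mem_pyRange_one.mp hj
      obtain ⟨hk1, hkN⟩ := PySem.List.mem_pyRange_one.mp hk
      obtain ⟨hl1, hlN⟩ := PySem.List.mem_pyRange_one.mp hl
      have hYe : Y = i * (j * (k * l)) := by rw [← hprod]; ring
      have e1 : Y / i = j * (k * l) := by rw [hYe, Int.mul_ediv_cancel_left _ (by omega)]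
      have e2 : Y / i / j = k * l := by rw [e1, Int.mul_ediv_cancel_left _ (by omega)]
      have e3 : Y / i / j / k = l := by rw [e2, Int.mul_ediv_cancel_left _ (by omega)]
      refine ⟨i, (mem_pvDivisors Y hY1 i).mpr ⟨⟨j * (k * l), hYe⟩, hi1⟩, ?_⟩
      rw [if_neg (by omega : ¬ i > N),
          PySem.Int.floordiv_eq_ediv_of_pos (by omega : (0:Int) < i), List.any_eq_true]
      have hYi1 : (1:Int) ≤ Y / i := by rw [e1]; nlinarith
      refine ⟨j, (mem_pvDivisors _ hYi1 j).mpr ⟨⟨k * l, e1⟩, hj1⟩, ?_⟩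
      rw [if_neg (by omega : ¬ j > N),
          PySem.Int.floordiv_eq_ediv_of_pos (by omega : (0:Int) < j), List.any_eq_true]
      have hYij1 : (1:Int) ≤ Y / i / j := by rw [e2]; nlinarith
      refine ⟨k, (mem_pvDivisors _ hYij1 k).mpr ⟨⟨l, e2⟩, hk1⟩, ?_⟩
      rw [if_neg (by omega : ¬ k > N),
          PySem.Int.floordiv_eq_ediv_of_pos (by omega : (0:Int) < k)]
      simp only [Bool.and_eq_true, decide_eq_true_iff]
      rw [e3]
      exact ⟨by omega, by omega⟩

-- ===== VERDICT (by name: the statement is the Claim_ definition above) =====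
theorem calc_py_spec : Claim_equal_calc_py := by
  intro N X Y _
  unfold Spec_calc_py
  rcases hb : calc_py_alt N X Y with _ | _
  · rcases ha : calc_py N X Y with _ | _
    · rfl
    · exact absurd ((calc_py_alt_iff N X Y).mpr ((calc_py_iff N X Y).mp ha)) (by simp [hb])
  · exact (calc_py_iff N X Y).mpr ((calc_py_alt_iff N X Y).mp hb)
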